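-- pv_equiv track=rewrite | github.com/Patrykmclaren14/Python | Tasks/duplicates.py | count_repeated_chars
-- ===== SOURCE A (Python) =====
-- def count_repeated_chars(s):
--     s = s.lower()  # convert to lowercase
--     char_count = {}
--     for char in s:
--         if char.isalnum():
--             if char in char_count:
--                 char_count[char] += 1
--             else:
--                 char_count[char] = 1
--     return len([char for char in char_count if char_count[char] > 1])
-- ===== SOURCE B (Python) =====
-- def count_repeated_chars(s):
--     chars = sorted(c for c in s.lower() if c.isalnum())
--     total = 0
--     while chars:
--         c = chars[0]
--         run = 1
--         while run < len(chars) and chars[run] == c: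
--             run += 1
--         if run > 1:
--             total += 1
--         chars = chars[run:]
--     return total
-- ===== Notes on version B (the rewrite author's own statement) =====
-- stated objective: alternative
-- what changed: Replaces the dictionary-counting pass and final key filter with sorting the kept characters and counting runs of length > 1 in one run-length scan.
import Mathlib
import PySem

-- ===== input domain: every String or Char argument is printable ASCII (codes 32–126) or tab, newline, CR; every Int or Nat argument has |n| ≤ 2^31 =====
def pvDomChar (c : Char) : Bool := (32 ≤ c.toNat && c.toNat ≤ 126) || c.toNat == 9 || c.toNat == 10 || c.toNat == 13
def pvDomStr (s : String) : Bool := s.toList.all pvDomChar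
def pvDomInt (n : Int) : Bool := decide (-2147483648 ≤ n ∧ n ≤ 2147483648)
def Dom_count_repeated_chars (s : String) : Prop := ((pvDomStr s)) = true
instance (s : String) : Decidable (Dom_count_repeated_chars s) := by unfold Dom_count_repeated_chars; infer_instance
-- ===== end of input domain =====

-- B replaces A's dictionary-counting pass with sort-then-run-length-scan: it sorts the kept
-- alphanumeric characters of s.lower() and counts the runs of length > 1 (alternative algorithm).

-- ===== PORT A =====
def count_repeated_chars (s : String) : Int :=
  let t := (PySem.Str.lower s).toList
  let d := t.foldl (fun (d : PySem.Dict Char Int) c =>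
    if PySem.Chars.isalnum c then
      if d.contains c then d.insert c (d.getD c 0 + 1) else d.insert c 1
    else d) PySem.Dict.empty
  ((d.keys.filter (fun c => d.getD c 0 > 1)).length : Int)


-- ===== PORT B =====
-- runScan is the outer while loop of Source B: consume one run of equal characters per step
def runScan : List Char → Int
  | [] => 0
  | c :: rest =>
    let run := 1 + (rest.takeWhile (fun x => x == c)).length
    (if run > 1 then (1 : Int) else 0) + runScan (rest.dropWhile (fun x => x == c))
termination_by l => l.length
decreasing_by
  simp only [List.length_cons]
  exact Nat.lt_succ_of_le (List.length_dropWhile_le _ _)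


def count_repeated_chars_alt (s : String) : Int :=
  runScan (PySem.List.sorted (((PySem.Str.lower s).toList).filter PySem.Chars.isalnum) (fun x => x) false)

-- ===== PRECONDITION & SPEC =====
def Spec_count_repeated_chars (s : String) (out : Int) : Prop := out = count_repeated_chars_alt s
instance (s : String) (out : Int) : Decidable (Spec_count_repeated_chars s out) := by unfold Spec_count_repeated_chars; infer_instance

-- ===== CLAIM (what is proved, stated in full; the proofs are below) =====
def Claim_equal_count_repeated_chars : Prop := ∀ (s : String), Dom_count_repeated_chars s → Spec_count_repeated_chars s (count_repeated_chars s)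

-- ===== LEMMAS AND PROOFS =====
-- distinctRepeats m = number of distinct characters occurring more than once in m;
-- both ports are proved equal to it (A via the counter dict, B via the sorted run scan).
def distinctRepeats (m : List Char) : Nat := (m.toFinset.filter (fun c => 1 < m.count c)).card

theorem distinctRepeats_perm {m m' : List Char} (h : m.Perm m') : distinctRepeats m = distinctRepeats m' := by
  unfold distinctRepeats
  have hF : m.toFinset = m'.toFinset := by ext x; simp [h.mem_iff]
  rw [hF, Finset.filter_congr (fun x _ => by rw [h.count_eq])]

theorem runScan_eq_distinctRepeats : ∀ (n : Nat) (m : List Char), m.length ≤ n → m.Pairwise (· ≤ ·) →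
    runScan m = (distinctRepeats m : Int) := by
  intro n
  induction n with
  | zero =>
    intro m hm _
    have : m = [] := List.eq_nil_of_length_eq_zero (Nat.le_zero.mp hm)
    subst this; simp [runScan, distinctRepeats]
  | succ n ih =>
    intro m hm hs
    match m with
    | [] => simp [runScan, distinctRepeats]
    | c :: rest =>
      obtain ⟨t, r, htdef, hrdef⟩ :
          ∃ t r, t = rest.takeWhile (fun x => x == c) ∧ r = rest.dropWhile (fun x => x == c) :=
        ⟨_, _, rfl, rfl⟩
      have hsplit : t ++ r = rest := by rw [htdef, hrdef]; exact List.takeWhile_append_dropWhile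
      have ht : ∀ x ∈ t, x = c := fun x hx => by
        have := List.mem_takeWhile_imp (htdef ▸ hx); simpa using this
      have hrsub : r.Sublist rest := hrdef ▸ List.dropWhile_sublist _
      have hrestpair : rest.Pairwise (· ≤ ·) := (List.pairwise_cons.mp hs).2
      have hcle : ∀ x ∈ rest, c ≤ x := (List.pairwise_cons.mp hs).1
      have hrpair : r.Pairwise (· ≤ ·) := hrestpair.sublist hrsub
      have hcr : c ∉ r := by
        intro hmem
        rw [hrdef] at hmem hrpair
        cases hreq : List.dropWhile (fun x => x == c) rest with
        | nil => rw [hreq] at hmem; simp at hmem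
        | cons x r' =>
          rw [hreq] at hmem hrpair
          have hpx : (x == c) = false := by
            have := List.head?_dropWhile_not (fun x => x == c) rest
            rw [hreq] at this; simpa using this
          have hxne : x ≠ c := by simpa using hpx
          have hxmem : x ∈ rest := by
            have hsub : (x :: r').Sublist rest := by
              rw [← hreq]; exact List.dropWhile_sublist _
            exact hsub.mem (List.mem_cons_self ..)
          have hclt : c < x := lt_of_le_of_ne (hcle x hxmem) (Ne.symm hxne)
          have hxle := (List.pairwise_cons.mp hrpair).1
          rcases List.mem_cons.mp hmem with h | h
          · exact hxne h.symm
          · exact absurd (hxle c h) (not_le.mpr hclt)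
      have htcount : t.count c = t.length := List.count_eq_length.mpr (fun b hb => (ht b hb).symm)
      have hrcount : r.count c = 0 := List.count_eq_zero.mpr hcr
      have hcount_c : (c :: rest).count c = 1 + t.length := by
        rw [← hsplit]
        simp [List.count_append, htcount, hrcount]
        omega
      have hcount_ne : ∀ x, x ≠ c → (c :: rest).count x = r.count x := by
        intro x hx
        have htz : t.count x = 0 := List.count_eq_zero.mpr (fun hmem => hx (ht x hmem))
        rw [← hsplit]
        simp [List.count_append, htz, Ne.symm hx]
      have htoF : (c :: rest).toFinset = insert c r.toFinset := by
        ext x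
        simp only [List.toFinset_cons, Finset.mem_insert, List.mem_toFinset, ← hsplit,
          List.mem_append]
        constructor
        · rintro (h | h | h)
          · exact Or.inl h
          · exact Or.inl (ht x h)
          · exact Or.inr h
        · rintro (h | h)
          · exact Or.inl h
          · exact Or.inr (Or.inr h)
      have hcnotin : c ∉ r.toFinset := by simpa using hcr
      have hfc : Finset.filter (fun x => 1 < (c :: rest).count x) r.toFinset
          = Finset.filter (fun x => 1 < r.count x) r.toFinset := by
        apply Finset.filter_congr
        intro x hx
        have hxne : x ≠ c := fun h => hcnotin (h ▸ hx)
        rw [hcount_ne x hxne]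
      have hD : distinctRepeats (c :: rest)
          = (if 1 + t.length > 1 then 1 else 0) + distinctRepeats r := by
        unfold distinctRepeats
        rw [htoF, Finset.filter_insert, hfc]
        by_cases hp : 1 < (c :: rest).count c
        · rw [if_pos hp, Finset.card_insert_of_notMem
            (fun hmem => hcnotin (Finset.mem_filter.mp hmem).1)]
          rw [hcount_c] at hp
          rw [if_pos (by omega)]
          omega
        · rw [if_neg hp]
          rw [hcount_c] at hp
          rw [if_neg (by omega)]
          omega
      have hlen : r.length ≤ n := by
        have h1 : r.length ≤ rest.length := hrdef ▸ List.length_dropWhile_le _ _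
        simp at hm; omega
      rw [runScan]
      simp only [← htdef, ← hrdef]
      rw [ih r hlen hrpair, hD]
      push_cast
      split_ifs <;> simp

theorem dict_loop_eq_counter (l : List Char) :
    l.foldl (fun (d : PySem.Dict Char Int) c =>
      if PySem.Chars.isalnum c then
        if d.contains c then d.insert c (d.getD c 0 + 1) else d.insert c 1
      else d) PySem.Dict.empty
    = PySem.Dict.counter (l.filter PySem.Chars.isalnum) := by
  have hbr : (fun (d : PySem.Dict Char Int) c =>
      if PySem.Chars.isalnum c then
        if d.contains c then d.insert c (d.getD c 0 + 1) else d.insert c 1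
      else d)
    = (fun (d : PySem.Dict Char Int) c =>
      if PySem.Chars.isalnum c then d.insert c (d.getD c 0 + 1) else d) := by
    funext d c
    by_cases h : d.contains c
    · simp [h]
    · have h0 : d.getD c 0 = 0 := by
        have hc : d.contains c = false := by simpa using h
        exact PySem.Dict.getD_of_not_contains (d := d) (k := c) 0 hc
      simp [h, h0]
  rw [hbr, ← List.foldl_filter, PySem.Dict.foldl_insert_getD_add_one_eq_counter]

theorem nodup_filter_length_eq_card (m : List Char) :
    ((PySem.List.dedup m).filter (fun c => 1 < m.count c)).length
      = distinctRepeats m := by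
  unfold distinctRepeats
  have hnd : ((PySem.List.dedup m).filter (fun c => 1 < m.count c)).Nodup :=
    (PySem.List.nodup_dedup m).filter _
  rw [← List.toFinset_card_of_nodup hnd, List.toFinset_filter]
  congr 2
  · funext c; simp
  · ext x
    simp

theorem main_eq (s : String) : count_repeated_chars s = count_repeated_chars_alt s := by
  simp only [count_repeated_chars, count_repeated_chars_alt]
  rw [dict_loop_eq_counter]
  set m := (PySem.Str.lower s).toList.filter PySem.Chars.isalnum with hm
  have h1 : (PySem.Dict.counter m).keys.filter (fun c => (PySem.Dict.counter m).getD c 0 > 1)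
      = (PySem.List.dedup m).filter (fun c => 1 < m.count c) := by
    rw [PySem.Dict.keys_counter, ← PySem.List.dedup_eq_ofList]
    apply List.filter_congr
    intro c _
    rw [PySem.Dict.getD_counter]
    simp
  rw [h1, nodup_filter_length_eq_card]
  have hperm : (PySem.List.sorted m (fun x => x) false).Perm m := PySem.List.sorted_perm ..
  have hpair : (PySem.List.sorted m (fun x => x) false).Pairwise (· ≤ ·) := by
    have := PySem.List.sorted_pairwise (xs := m) (key := fun x => x)
    simpa using this
  rw [runScan_eq_distinctRepeats (PySem.List.sorted m (fun x => x) false).length _ le_rfl hpair,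
      distinctRepeats_perm hperm]

-- ===== VERDICT (by name: the statement is the Claim_ definition above) =====
theorem count_repeated_chars_spec : Claim_equal_count_repeated_chars := by
  intro s _
  exact main_eq s
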